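-- pv_equiv track=rewrite | github.com/NASA-SW-VnV/cocosim_tests | scripts/generate_web.py | get_success
-- ===== SOURCE A (Python) =====
-- def get_success(data):
--     valid_key = [key for key in data.keys() if key.endswith('valid')]
--     failed_key = [key for key in data.keys() if key.endswith('failed')]
--     broken = sum([abs(int(data[key])) for key in failed_key])
--     valid = sum([abs(int(data[key])) for key in valid_key])
--     if broken > 0 or len(valid_key) > valid:
--         return False
--     else:
--         return True
-- ===== SOURCE B (Python) =====
-- def get_success(data):
--     deficit = 0
--     for key, value in data.items():
--         if key.endswith('failed') and int(value) != 0: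
--             return False
--         if key.endswith('valid'):
--             deficit += abs(int(value)) - 1
--     return deficit >= 0
-- ===== Notes on version B (the rewrite author's own statement) =====
-- stated objective: alternative
-- what changed: Instead of building the broken/valid sums and comparing len(valid_key) against the valid sum, B scans the items once, returns False immediately at the first 'failed' key with a nonzero value (short-circuit, no broken sum), and otherwise maintains a single signed deficit accumulator abs(int(v))-1 per 'valid' key, returning deficit >= 0.
import Mathlib
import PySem

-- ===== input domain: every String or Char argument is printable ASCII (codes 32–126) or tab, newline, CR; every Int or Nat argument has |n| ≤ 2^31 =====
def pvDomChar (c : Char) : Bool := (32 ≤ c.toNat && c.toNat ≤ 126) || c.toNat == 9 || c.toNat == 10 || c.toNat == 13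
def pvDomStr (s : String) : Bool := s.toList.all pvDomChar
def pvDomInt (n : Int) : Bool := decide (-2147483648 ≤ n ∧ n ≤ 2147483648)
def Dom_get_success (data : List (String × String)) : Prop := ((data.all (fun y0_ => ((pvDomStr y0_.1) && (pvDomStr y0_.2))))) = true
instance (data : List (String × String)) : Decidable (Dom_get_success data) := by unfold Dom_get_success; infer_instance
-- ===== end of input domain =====

-- B replaces A's sum-and-compare passes by one short-circuit scan with a single signed
-- deficit accumulator; objective: alternative decomposition of the same boolean.

-- ===== PORT A =====
-- int(s), totalized with 0: Pre_ excludes exactly the inputs where int() raises ValueError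
def pvParse (s : String) : Int := (PySem.Int.ofStr? s).getD 0

def get_success (data : List (String × String)) : Bool :=
  let d := PySem.Dict.ofList data
  let valid_key := d.keys.filter (fun k => PySem.Str.endswith k "valid")
  let failed_key := d.keys.filter (fun k => PySem.Str.endswith k "failed")
  let broken := (failed_key.map (fun k => |pvParse (d.getD k "")|)).sum
  let valid := (valid_key.map (fun k => |pvParse (d.getD k "")|)).sum
  if broken > 0 ∨ (valid_key.length : Int) > valid then false else true

-- ===== PORT B =====
-- B's loop: early `return False` at the first failed key with nonzero value,
-- else accumulate the signed deficit for valid keys; at the end test deficit ≥ 0.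
def pvScan (deficit : Int) : List (String × String) → Bool
  | [] => decide (deficit ≥ 0)
  | p :: l =>
    if PySem.Str.endswith p.1 "failed" && !(pvParse p.2 == 0) then false
    else if PySem.Str.endswith p.1 "valid" then pvScan (deficit + (|pvParse p.2| - 1)) l
    else pvScan deficit l

def get_success_alt (data : List (String × String)) : Bool :=
  pvScan 0 (PySem.Dict.ofList data).items

-- ===== PRECONDITION & SPEC =====
-- Pre_ excludes exactly the inputs on which the Python A raises ValueError: a dict entry whose
-- key ends with 'valid' or 'failed' but whose value is not an int literal.
def Pre_get_success (data : List (String × String)) : Prop :=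
  ∀ p ∈ (PySem.Dict.ofList data).items,
    (PySem.Str.endswith p.1 "valid" || PySem.Str.endswith p.1 "failed") = true →
      (PySem.Int.ofStr? p.2).isSome = true
instance (data : List (String × String)) : Decidable (Pre_get_success data) := by unfold Pre_get_success; infer_instance
def pvWitness_get_success : (List (String × String)) := [("avalid", "2"), ("bfailed", "0"), ("note", "x")]
def Spec_get_success (data : List (String × String)) (out : Bool) : Prop := out = get_success_alt data
instance (data : List (String × String)) (out : Bool) : Decidable (Spec_get_success data out) := by unfold Spec_get_success; infer_instance

-- ===== CLAIM (what is proved, stated in full; the proofs are below) =====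
def Claim_equal_get_success : Prop := ∀ (data : List (String × String)), Dom_get_success data → Pre_get_success data → Spec_get_success data (get_success data)

-- ===== LEMMAS AND PROOFS =====

-- B's short-circuit scan, characterized: false iff some failed key has a nonzero value,
-- otherwise the test of deficit + Σ (|v|-1) over the valid keys.
theorem pvScan_eq (l : List (String × String)) (d : Int) :
    pvScan d l =
      (!(l.any (fun p => PySem.Str.endswith p.1 "failed" && !(pvParse p.2 == 0))) &&
        decide (d + ((l.filter (fun p => PySem.Str.endswith p.1 "valid")).map
                      (fun p => |pvParse p.2| - 1)).sum ≥ 0)) := by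
  induction l generalizing d with
  | nil => simp [pvScan]
  | cons p l ih =>
    simp only [pvScan]
    by_cases hb : (PySem.Str.endswith p.1 "failed" && !(pvParse p.2 == 0)) = true
    · rw [if_pos hb]
      simp only [List.any_cons, hb, Bool.true_or, Bool.not_true, Bool.false_and]
    · rw [if_neg hb]
      rw [Bool.not_eq_true] at hb
      cases hv : PySem.Str.endswith p.1 "valid"
      · rw [if_neg (by simp), ih]
        simp only [List.any_cons, hb, Bool.false_or, List.filter_cons, hv, Bool.false_eq_true,
          if_false]
      · rw [if_pos rfl, ih]
        simp only [List.any_cons, hb, Bool.false_or, List.filter_cons, hv, if_true,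
          List.map_cons, List.sum_cons, ge_iff_le]
        have : d + (|pvParse p.2| - 1) +
            ((l.filter (fun p => PySem.Str.endswith p.1 "valid")).map
              (fun p => |pvParse p.2| - 1)).sum
            = d + ((|pvParse p.2| - 1) +
            ((l.filter (fun p => PySem.Str.endswith p.1 "valid")).map
              (fun p => |pvParse p.2| - 1)).sum) := by ring
        rw [this]

-- Σ (g - 1) over a list = Σ g - length
theorem sum_sub_one (l : List (String × String)) (g : String × String → Int) :
    (l.map (fun p => g p - 1)).sum = (l.map g).sum - l.length := by
  induction l with
  | nil => simp
  | cons p l ih => simp [ih]; ring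

-- a sum of absolute values is positive iff some element is nonzero
theorem sum_abs_pos (l : List (String × String)) (g : String × String → Int) :
    (0 < (l.map (fun p => |g p|)).sum) ↔ (l.any (fun p => !(g p == 0))) = true := by
  induction l with
  | nil => simp
  | cons p l ih =>
    simp only [List.map_cons, List.sum_cons, List.any_cons, Bool.or_eq_true, ← ih]
    have h2 : 0 ≤ (l.map (fun p => |g p|)).sum := by
      apply List.sum_nonneg; intro x hx
      obtain ⟨y, _, rfl⟩ := List.mem_map.mp hx
      exact abs_nonneg _
    constructor
    · intro h
      by_cases hp : g p = 0
      · right; rw [hp] at h; simp at h; omega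
      · left; simpa using hp
    · rintro (h | h)
      · have hne : g p ≠ 0 := by simpa using h
        have := abs_pos.mpr hne
        have := abs_nonneg (g p)
        omega
      · have := abs_nonneg (g p); omega

-- A's key-filter-then-lookup pass equals the corresponding filter over the items themselves
theorem pvKeys_to_items (d : PySem.Dict String String) (hnd : d.keys.Nodup) (q : String → Bool) :
    d.items.filter (fun p => q p.1) = (d.keys.filter q).map (fun k => (k, d.getD k "")) := by
  conv_lhs => rw [PySem.Dict.items_eq_map_keys d hnd ""]
  rw [List.filter_map]
  simp only [Function.comp_def]

theorem get_success_eq_alt (data : List (String × String)) :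
    get_success data = get_success_alt data := by
  unfold get_success get_success_alt
  rw [pvScan_eq]
  have hnd := PySem.Dict.nodup_keys_ofList data
  set d := PySem.Dict.ofList data with hd
  rw [← List.any_filter,
      pvKeys_to_items d hnd (fun k => PySem.Str.endswith k "failed"),
      pvKeys_to_items d hnd (fun k => PySem.Str.endswith k "valid"),
      List.any_map, List.map_map]
  simp only [Function.comp_def, zero_add]
  set F := d.keys.filter (fun k => PySem.Str.endswith k "failed") with hF
  set V := d.keys.filter (fun k => PySem.Str.endswith k "valid") with hV
  have habs := sum_abs_pos (F.map (fun k => (k, d.getD k ""))) (fun p => pvParse p.2)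
  simp only [List.map_map, Function.comp_def, List.any_map] at habs
  have hsum := sum_sub_one (V.map (fun k => (k, d.getD k ""))) (fun p => |pvParse p.2|)
  simp only [List.map_map, Function.comp_def, List.length_map] at hsum
  by_cases h1 : 0 < (F.map (fun k => |pvParse (d.getD k "")|)).sum
  · rw [if_pos (Or.inl h1), habs.mp h1]
    simp
  · have hfa : (F.any fun x => !(pvParse (d.getD x "") == 0)) = false := by
      rw [← Bool.not_eq_true]
      intro hc
      exact h1 (habs.mpr hc)
    rw [hfa]
    simp only [Bool.not_false, Bool.true_and]
    rw [hsum]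
    by_cases h2 : ((V.length : Int) > (V.map (fun k => |pvParse (d.getD k "")|)).sum)
    · rw [if_pos (Or.inr h2)]
      symm
      rw [decide_eq_false_iff_not]
      omega
    · rw [if_neg (by rintro (h | h) <;> omega)]
      symm
      rw [decide_eq_true_iff]
      omega

-- ===== VERDICT (by name: the statement is the Claim_ definition above) =====
theorem get_success_spec : Claim_equal_get_success := by
  intro data _ _
  exact get_success_eq_alt data
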